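-- pv_equiv track=rewrite | github.com/klavinslab/pymbt-legacy | oligo_synthesis/gene_splitter.py | remove_from_left
-- ===== SOURCE A (Python) =====
-- def remove_from_left(pre_combo_list, max_len):
--     '''Traverses list of lists of (start, end, score) tuples of the type
--     returned by context_walk. Removes any entries that cannot bridge the
--     gap to the next set of overlaps (distance greater than max_distance)'''
--
--     pcl = pre_combo_list
--     pcl_new = [x for x in pcl]
--     for i in range(len(pcl) - 1):
--         starts = [x[0] for x in pcl[i]]
--         ends = [x[1] for x in pcl[i + 1]]
--
--         for j, s in enumerate(starts):
--             spanned = [(x - s) <= max_len for x in ends]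
--             if not any(spanned):
--                 pcl_new[i].pop(j)
--                 return True
--     return False
-- ===== SOURCE B (Python) =====
-- def remove_from_left(pre_combo_list, max_len):
--     for cur, nxt in zip(pre_combo_list, pre_combo_list[1:]):
--         threshold = min((e for _, e, _ in nxt), default=None)
--         for j, (s, _, _) in enumerate(cur):
--             if threshold is None or threshold - s > max_len:
--                 cur.pop(j)
--                 return True
--     return False
-- ===== Notes on version B (the rewrite author's own statement) =====
-- stated objective: faster
-- what changed: Instead of building, for every start of level i, the list of booleans (end - start <= max_len) over all ends of level i+1 and calling any(), B computes min(ends) once per adjacent pair and compares each start against that single threshold.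
import Mathlib
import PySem

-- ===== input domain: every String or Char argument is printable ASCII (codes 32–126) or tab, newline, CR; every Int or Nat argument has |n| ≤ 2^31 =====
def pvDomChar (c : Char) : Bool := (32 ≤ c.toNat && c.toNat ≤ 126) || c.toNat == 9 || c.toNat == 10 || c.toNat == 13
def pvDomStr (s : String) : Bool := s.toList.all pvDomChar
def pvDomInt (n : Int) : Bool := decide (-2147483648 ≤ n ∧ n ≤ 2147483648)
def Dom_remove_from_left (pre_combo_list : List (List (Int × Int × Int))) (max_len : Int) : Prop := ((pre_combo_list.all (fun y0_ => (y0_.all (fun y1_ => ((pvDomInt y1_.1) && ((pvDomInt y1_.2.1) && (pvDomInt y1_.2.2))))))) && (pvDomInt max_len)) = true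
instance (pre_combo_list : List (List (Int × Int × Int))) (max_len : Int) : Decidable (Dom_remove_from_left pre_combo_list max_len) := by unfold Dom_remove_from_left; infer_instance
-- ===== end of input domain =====

-- B replaces A's per-start scan of all next-level ends by a single min(ends) threshold per adjacent pair (asymptotically fewer comparisons); return-value equivalence (both also pop the same entry in Python).


-- ===== PORT A =====
-- inner 'for j, s in enumerate(starts)': build 'spanned' and early-return on 'not any(spanned)'
def pvA_inner (starts ends : List Int) (max_len : Int) : Bool :=
  match starts with
  | [] => false
  | s :: rest =>
    let spanned := ends.map (fun x => decide (x - s ≤ max_len))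
    if !(spanned.any id) then true else pvA_inner rest ends max_len

-- outer 'for i in range(len(pcl) - 1)' reading pcl[i] and pcl[i+1]: recursion over adjacent pairs
def pvA_outer (pcl : List (List (Int × Int × Int))) (max_len : Int) : Bool :=
  match pcl with
  | cur :: nxt :: rest =>
    let starts := cur.map (fun x => x.1)
    let ends := nxt.map (fun x => x.2.1)
    if pvA_inner starts ends max_len then true else pvA_outer (nxt :: rest) max_len
  | _ => false

def remove_from_left (pre_combo_list : List (List (Int × Int × Int))) (max_len : Int) : Bool :=
  pvA_outer pre_combo_list max_len

-- ===== PORT B =====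
def remove_from_left_alt (pre_combo_list : List (List (Int × Int × Int))) (max_len : Int) : Bool :=
  (pre_combo_list.zip pre_combo_list.tail).any (fun p =>
    let threshold := PySem.List.min? (p.2.map (fun x => x.2.1)) (fun e => e)
    p.1.any (fun t =>
      match threshold with
      | none => true
      | some mn => decide (mn - t.1 > max_len)))

-- ===== PRECONDITION & SPEC =====
def Spec_remove_from_left (pre_combo_list : List (List (Int × Int × Int))) (max_len : Int) (out : Bool) : Prop := out = remove_from_left_alt pre_combo_list max_len
instance (pre_combo_list : List (List (Int × Int × Int))) (max_len : Int) (out : Bool) : Decidable (Spec_remove_from_left pre_combo_list max_len out) := by unfold Spec_remove_from_left; infer_instance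

-- ===== CLAIM (what is proved, stated in full; the proofs are below) =====
def Claim_equal_remove_from_left : Prop := ∀ (pre_combo_list : List (List (Int × Int × Int))) (max_len : Int), Dom_remove_from_left pre_combo_list max_len → Spec_remove_from_left pre_combo_list max_len (remove_from_left pre_combo_list max_len)

-- ===== LEMMAS AND PROOFS =====

-- A's 'not any(spanned)' for one start s equals B's single comparison against min(ends)
theorem pvInner_one (ends : List Int) (s max_len : Int) :
    (!((ends.map (fun x => decide (x - s ≤ max_len))).any id)) =
      (match PySem.List.min? ends (fun e => e) with
       | none => true
       | some mn => decide (mn - s > max_len)) := by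
  cases ends with
  | nil => simp [PySem.List.min?]
  | cons e t =>
    rw [PySem.List.min?_id_cons]
    simp only [List.map_cons, List.any_cons, id]
    have hmem := PySem.List.foldl_min_mem t e
    have hle := PySem.List.foldl_min_le t e
    by_cases h : t.foldl min e - s > max_len
    · simp only [h, decide_true]
      simp only [Bool.not_eq_true', Bool.or_eq_false_iff, decide_eq_false_iff_not, not_le,
        List.any_eq_false, List.mem_map]
      refine ⟨?_, ?_⟩
      · have := hle.1; omega
      · rintro b ⟨x, hx, rfl⟩
        have := hle.2 x hx
        simp only [id, decide_eq_true_eq]; omega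
    · simp only [h, decide_false]
      rw [Bool.not_eq_false']
      rcases hmem with h' | h'
      · rw [h'] at h
        have : decide (e - s ≤ max_len) = true := by simp only [decide_eq_true_eq]; omega
        rw [this, Bool.true_or]
      · have : ((List.map (fun x => decide (x - s ≤ max_len)) t).any id) = true :=
          List.any_eq_true.mpr ⟨_, List.mem_map.mpr ⟨_, h', rfl⟩, by simp only [id, decide_eq_true_eq]; omega⟩
        rw [this, Bool.or_true]

theorem pvInner_eq (cur : List (Int × Int × Int)) (ends : List Int) (max_len : Int) :
    pvA_inner (cur.map (fun x => x.1)) ends max_len =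
      cur.any (fun t =>
        match PySem.List.min? ends (fun e => e) with
        | none => true
        | some mn => decide (mn - t.1 > max_len)) := by
  induction cur with
  | nil => simp [pvA_inner]
  | cons c rest ih =>
    simp only [List.map_cons, pvA_inner, List.any_cons]
    rw [← ih, pvInner_one ends c.1 max_len]
    cases h : (match PySem.List.min? ends (fun e => e) with
       | none => true
       | some mn => decide (mn - c.1 > max_len)) <;> simp

theorem pv_main (pcl : List (List (Int × Int × Int))) (max_len : Int) :
    pvA_outer pcl max_len = remove_from_left_alt pcl max_len := by
  induction pcl with
  | nil => simp [pvA_outer, remove_from_left_alt]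
  | cons cur rest ih =>
    cases rest with
    | nil => simp [pvA_outer, remove_from_left_alt]
    | cons nxt rest' =>
      simp only [pvA_outer, remove_from_left_alt, List.tail_cons, List.zip_cons_cons,
        List.any_cons]
      rw [pvInner_eq]
      have := ih
      simp only [remove_from_left_alt, List.tail_cons] at this
      rw [this]
      cases h : (cur.any fun t =>
          match PySem.List.min? (nxt.map fun x => x.2.1) (fun e => e) with
          | none => true
          | some mn => decide (mn - t.1 > max_len)) <;> simp

-- ===== VERDICT (by name: the statement is the Claim_ definition above) =====
theorem remove_from_left_spec : Claim_equal_remove_from_left := by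
  intro pcl max_len _
  unfold Spec_remove_from_left remove_from_left
  exact pv_main pcl max_len
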